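-- pv_equiv track=rewrite | github.com/ladder2sky/badminton_cutter | src/decision/rally_analyzer.py | _find_last_hit_in_range
-- ===== SOURCE A (Python) =====
-- def _find_last_hit_in_range(hit_events, start_time, end_time):
--     """
--     查找指定时间范围内最后一次击球声的时间。
--     """
--     last_hit = None
--     for h in hit_events:
--         if start_time <= h <= end_time:
--             last_hit = h
--         elif h > end_time:
--             break
--     return last_hit
-- ===== SOURCE B (Python) =====
-- def _find_last_hit_in_range(hit_events, start_time, end_time):
--     # Prefix up to (excluding) the first event later than end_time,
--     # then scan it back-to-front for the first event >= start_time.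
--     n = 0
--     while n < len(hit_events) and hit_events[n] <= end_time:
--         n += 1
--     for i in range(n - 1, -1, -1):
--         if hit_events[i] >= start_time:
--             return hit_events[i]
--     return None
-- ===== Notes on version B (the rewrite author's own statement) =====
-- stated objective: alternative
-- what changed: Replaces A's forward scan that carries a last-seen accumulator with a two-phase form: cut the prefix before the first event > end_time, then scan that prefix backwards and return the first event >= start_time (no accumulator, early exit from the back).
import Mathlib
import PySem

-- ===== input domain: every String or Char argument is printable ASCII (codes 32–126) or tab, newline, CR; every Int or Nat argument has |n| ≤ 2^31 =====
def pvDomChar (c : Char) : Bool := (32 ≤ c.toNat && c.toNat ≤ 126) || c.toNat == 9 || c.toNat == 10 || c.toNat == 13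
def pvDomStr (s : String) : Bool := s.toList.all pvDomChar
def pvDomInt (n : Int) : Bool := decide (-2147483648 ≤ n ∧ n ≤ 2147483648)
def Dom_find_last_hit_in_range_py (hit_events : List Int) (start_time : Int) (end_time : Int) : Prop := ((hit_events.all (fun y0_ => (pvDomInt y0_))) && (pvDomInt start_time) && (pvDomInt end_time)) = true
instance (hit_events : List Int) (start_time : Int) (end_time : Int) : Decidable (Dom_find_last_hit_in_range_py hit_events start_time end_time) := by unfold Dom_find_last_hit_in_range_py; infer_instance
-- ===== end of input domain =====

-- ===== PORT A =====
-- A: forward loop carrying last_hit; breaks at the first element > end_time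
def pvLoopA (xs : List Int) (start_time end_time : Int) (last_hit : Option Int) : Option Int :=
  match xs with
  | [] => last_hit
  | h :: t =>
    if start_time ≤ h ∧ h ≤ end_time then pvLoopA t start_time end_time (some h)
    else if h > end_time then last_hit
    else pvLoopA t start_time end_time last_hit

def find_last_hit_in_range_py (hit_events : List Int) (start_time : Int) (end_time : Int) : Option Int :=
  pvLoopA hit_events start_time end_time none

-- ===== PORT B =====
-- B: prefix of elements ≤ end_time (the while loop of Source B) …
def pvPrefixLE (xs : List Int) (end_time : Int) : List Int :=
  match xs with
  | [] => []
  | h :: t => if h ≤ end_time then h :: pvPrefixLE t end_time else []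

-- … scanned back-to-front (the `for i in range(n-1,-1,-1)` loop of Source B)
def pvRevFind (xs : List Int) (start_time : Int) : Option Int :=
  match xs with
  | [] => none
  | h :: t => if h ≥ start_time then some h else pvRevFind t start_time

def find_last_hit_in_range_py_alt (hit_events : List Int) (start_time : Int) (end_time : Int) : Option Int :=
  pvRevFind (pvPrefixLE hit_events end_time).reverse start_time

-- ===== PRECONDITION & SPEC =====
def Spec_find_last_hit_in_range_py (hit_events : List Int) (start_time : Int) (end_time : Int) (out : Option Int) : Prop := out = find_last_hit_in_range_py_alt hit_events start_time end_time
instance (hit_events : List Int) (start_time : Int) (end_time : Int) (out : Option Int) : Decidable (Spec_find_last_hit_in_range_py hit_events start_time end_time out) := by unfold Spec_find_last_hit_in_range_py; infer_instance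

-- ===== CLAIM (what is proved, stated in full; the proofs are below) =====
def Claim_equal_find_last_hit_in_range_py : Prop := ∀ (hit_events : List Int) (start_time : Int) (end_time : Int), Dom_find_last_hit_in_range_py hit_events start_time end_time → Spec_find_last_hit_in_range_py hit_events start_time end_time (find_last_hit_in_range_py hit_events start_time end_time)

-- ===== LEMMAS AND PROOFS =====

-- ===== VERDICT (by name: the statement is the Claim_ definition above) =====
theorem pvRevFind_append (l₁ l₂ : List Int) (s : Int) :
    pvRevFind (l₁ ++ l₂) s = ((pvRevFind l₁ s).elim (pvRevFind l₂ s) some) := by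
  induction l₁ with
  | nil => simp [pvRevFind]
  | cons h t ih => by_cases hs : h ≥ s <;> simp [pvRevFind, hs, ih]

theorem pvLoopA_eq (xs : List Int) (s e : Int) (acc : Option Int) :
    pvLoopA xs s e acc = ((pvRevFind (pvPrefixLE xs e).reverse s).elim acc some) := by
  induction xs generalizing acc with
  | nil => simp [pvLoopA, pvPrefixLE, pvRevFind]
  | cons h t ih =>
    by_cases hin : s ≤ h ∧ h ≤ e
    · have hle : h ≤ e := hin.2
      have hge : h ≥ s := hin.1
      simp only [pvLoopA, pvPrefixLE, if_pos hin, if_pos hle, List.reverse_cons,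
        pvRevFind_append, ih]
      cases pvRevFind (pvPrefixLE t e).reverse s <;> simp [pvRevFind, hge]
    · by_cases hgt : h > e
      · have : ¬ h ≤ e := by omega
        simp [pvLoopA, pvPrefixLE, hgt, this, pvRevFind]
      · have hle : h ≤ e := by omega
        simp only [pvLoopA, pvPrefixLE, if_neg hin, if_neg hgt, if_pos hle,
          List.reverse_cons, pvRevFind_append, ih]
        have hs : ¬ h ≥ s := by omega
        cases pvRevFind (pvPrefixLE t e).reverse s <;> simp [pvRevFind, hs]

theorem find_last_hit_in_range_py_spec : Claim_equal_find_last_hit_in_range_py := by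
  intro hit_events start_time end_time _
  unfold Spec_find_last_hit_in_range_py find_last_hit_in_range_py find_last_hit_in_range_py_alt
  rw [pvLoopA_eq]
  cases pvRevFind (pvPrefixLE hit_events end_time).reverse start_time <;> simp
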